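-- pv_equiv track=rewrite | github.com/SolomiaKukharuk/algo_hw | hw17/t17_06_e2242.py | restore_tree_from_input
-- ===== SOURCE A (Python) =====
-- def restore_tree_from_input(lines):
--     class TreeNode:
--         def __init__(self, val):
--             self.val = val
--             self.left = None
--             self.right = None
--
--     def insert_bst(root, val):
--         if root is None:
--             return TreeNode(val)
--         if val < root.val:
--             root.left = insert_bst(root.left, val)
--         else:
--             root.right = insert_bst(root.right, val)
--         return root
--
--     def postorder_insert(reversed_stack):
--         root = None
--         for letter in reversed_stack:
--             root = insert_bst(root, letter)
--         return root
--
--     def preorder_traversal(node):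
--         if not node:
--             return ''
--         return node.val + preorder_traversal(node.left) + preorder_traversal(node.right)
--
--     stack = []
--     for line in lines:
--         line = line.strip()
--         if line == '*':
--             break
--         stack.extend(line)
--     reversed_stack = stack[::-1]
--     root = postorder_insert(reversed_stack)
--     return preorder_traversal(root)
-- ===== SOURCE B (Python) =====
-- def restore_tree_from_input(lines):
--     # Collect characters up to the '*' sentinel, then reverse: that is the
--     # BST insertion sequence. Instead of building a tree, emit the preorder
--     # directly: the first element is the root; smaller elements (in order)
--     # form the left subtree's insertion sequence, others the right one.
--     chars = []
--     for line in lines: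
--         line = line.strip()
--         if line == '*':
--             break
--         chars.extend(line)
--     chars.reverse()
--
--     def pre(seq):
--         if not seq:
--             return ''
--         r = seq[0]
--         rest = seq[1:]
--         return r + pre([x for x in rest if x < r]) + pre([x for x in rest if x >= r])
--
--     return pre(chars)
-- ===== Notes on version B (the rewrite author's own statement) =====
-- stated objective: alternative
-- what changed: B never builds a tree: it emits the preorder directly by quicksort-style partitioning of the insertion sequence (root first, then the sub-sequences of smaller and of not-smaller characters), replacing A's node-by-node recursive BST construction plus separate preorder traversal.
import Mathlib
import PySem

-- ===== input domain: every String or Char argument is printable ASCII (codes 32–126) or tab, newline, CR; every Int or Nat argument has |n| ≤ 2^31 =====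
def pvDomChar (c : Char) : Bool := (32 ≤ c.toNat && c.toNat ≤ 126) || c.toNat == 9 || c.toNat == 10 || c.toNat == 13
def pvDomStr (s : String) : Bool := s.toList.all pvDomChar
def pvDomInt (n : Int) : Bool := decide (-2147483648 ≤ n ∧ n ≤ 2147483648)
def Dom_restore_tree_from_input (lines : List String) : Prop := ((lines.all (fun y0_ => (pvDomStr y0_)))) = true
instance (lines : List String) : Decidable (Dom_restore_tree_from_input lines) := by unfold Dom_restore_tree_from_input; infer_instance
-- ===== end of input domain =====

-- B emits the BST preorder directly by partitioning the insertion sequence (no tree built); alternative algorithm, similar cost.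


-- ===== PORT A =====
inductive PvTree where
  | nil : PvTree
  | node : Char → PvTree → PvTree → PvTree
deriving DecidableEq, Repr

def pvInsertBst : PvTree → Char → PvTree
  | .nil, v => .node v .nil .nil
  | .node w l r, v => if v < w then .node w (pvInsertBst l v) r else .node w l (pvInsertBst r v)

def pvPostorderInsert (xs : List Char) : PvTree := xs.foldl pvInsertBst .nil

def pvPreorderTraversal : PvTree → List Char
  | .nil => []
  | .node v l r => v :: (pvPreorderTraversal l ++ pvPreorderTraversal r)

-- the 'for line in lines' loop with the '*' break
def pvStackA : List String → List Char
  | [] => []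
  | line :: rest =>
    let s := PySem.Str.strip line
    if s = "*" then [] else s.toList ++ pvStackA rest

def restore_tree_from_input (lines : List String) : String :=
  let stack := pvStackA lines
  let reversed_stack := stack.reverse
  let root := pvPostorderInsert reversed_stack
  String.mk (pvPreorderTraversal root)

-- ===== PORT B =====
def pvStackB : List String → List Char
  | [] => []
  | line :: rest =>
    let s := PySem.Str.strip line
    if s = "*" then [] else s.toList ++ pvStackB rest

def pvPre : List Char → List Char
  | [] => []
  | r :: rest => r :: (pvPre (rest.filter (fun x => x < r)) ++ pvPre (rest.filter (fun x => r ≤ x)))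
termination_by seq => seq.length
decreasing_by
  all_goals
    simp only [List.length_unattach]
    exact Nat.lt_succ_of_le (le_trans (List.length_filter_le _ _) List.length_attach.le)

def restore_tree_from_input_alt (lines : List String) : String :=
  String.mk (pvPre ((pvStackB lines).reverse))

-- ===== PRECONDITION & SPEC =====
def Spec_restore_tree_from_input (lines : List String) (out : String) : Prop := out = restore_tree_from_input_alt lines
instance (lines : List String) (out : String) : Decidable (Spec_restore_tree_from_input lines out) := by unfold Spec_restore_tree_from_input; infer_instance

-- ===== CLAIM (what is proved, stated in full; the proofs are below) =====
def Claim_equal_restore_tree_from_input : Prop := ∀ (lines : List String), Dom_restore_tree_from_input lines → Spec_restore_tree_from_input lines (restore_tree_from_input lines)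

-- ===== LEMMAS AND PROOFS =====
lemma pvStack_eq (lines : List String) : pvStackA lines = pvStackB lines := by
  induction lines with
  | nil => rfl
  | cons l rest ih => simp [pvStackA, pvStackB, ih]

lemma foldl_insert_node (xs : List Char) (v : Char) (l r : PvTree) :
    xs.foldl pvInsertBst (.node v l r)
      = .node v ((xs.filter (fun x => x < v)).foldl pvInsertBst l)
                ((xs.filter (fun x => v ≤ x)).foldl pvInsertBst r) := by
  induction xs generalizing l r with
  | nil => simp
  | cons x xs ih =>
    by_cases h : x < v
    · have h2 : ¬ v ≤ x := not_le.mpr h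
      simp [List.foldl, pvInsertBst, h, h2, List.filter, ih]
    · have h2 : v ≤ x := not_lt.mp h
      simp [List.foldl, pvInsertBst, h, h2, List.filter, ih]

lemma preorder_build (n : ℕ) : ∀ xs : List Char, xs.length ≤ n →
    pvPreorderTraversal (xs.foldl pvInsertBst .nil) = pvPre xs := by
  induction n with
  | zero =>
    intro xs h
    have : xs = [] := List.eq_nil_of_length_eq_zero (Nat.le_zero.mp h)
    subst this; simp [pvPre, pvPreorderTraversal]
  | succ n ih =>
    intro xs h
    match xs with
    | [] => simp [pvPre, pvPreorderTraversal]
    | x :: t =>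
      have ht : t.length ≤ n := Nat.lt_succ_iff.mp h
      have hl : (t.filter (fun a => a < x)).length ≤ n :=
        le_trans (List.length_filter_le _ _) ht
      have hr : (t.filter (fun a => x ≤ a)).length ≤ n :=
        le_trans (List.length_filter_le _ _) ht
      calc pvPreorderTraversal ((x :: t).foldl pvInsertBst .nil)
          = pvPreorderTraversal (t.foldl pvInsertBst (.node x .nil .nil)) := by
            simp [List.foldl, pvInsertBst]
        _ = x :: (pvPreorderTraversal ((t.filter (fun a => a < x)).foldl pvInsertBst .nil)
              ++ pvPreorderTraversal ((t.filter (fun a => x ≤ a)).foldl pvInsertBst .nil)) := by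
            rw [foldl_insert_node]; rfl
        _ = x :: (pvPre (t.filter (fun a => a < x)) ++ pvPre (t.filter (fun a => x ≤ a))) := by
            rw [ih _ hl, ih _ hr]
        _ = pvPre (x :: t) := by rw [pvPre]

-- ===== VERDICT (by name: the statement is the Claim_ definition above) =====
theorem restore_tree_from_input_spec : Claim_equal_restore_tree_from_input := by
  intro lines _
  show String.mk (pvPreorderTraversal ((pvStackA lines).reverse.foldl pvInsertBst .nil))
      = String.mk (pvPre ((pvStackB lines).reverse))
  rw [pvStack_eq]
  exact congrArg String.mk (preorder_build (pvStackB lines).reverse.length _ le_rfl)
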